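-- pv_equiv track=rewrite | github.com/phitsanu07/becraft | scripts/apply_v0.2_improvements.py | insert_after_title
-- ===== SOURCE A (Python) =====
-- def insert_after_title(content: str, new_section: str) -> str:
--     """Insert new section after the first H1 title (# Title vX.Y)."""
--     lines = content.split('\n')
--     out = []
--     inserted = False
--
--     for i, line in enumerate(lines):
--         out.append(line)
--         # After H1 + blank line, before next content
--         if not inserted and line.startswith('# ') and 'Agent v' in line:
--             # Find next non-blank line, insert before it
--             out.append('')
--             out.append(new_section.rstrip())
--             out.append('')
--             inserted = True
--
--     return '\n'.join(out)
-- ===== SOURCE B (Python) =====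
-- def insert_after_title(content: str, new_section: str) -> str:
--     """Insert new section after the first H1 title (# Title vX.Y)."""
--     lines = content.split('\n')
--     idx = next((i for i, l in enumerate(lines)
--                 if l.startswith('# ') and 'Agent v' in l), None)
--     if idx is None:
--         return content
--     return '\n'.join(lines[:idx + 1] + ['', new_section.rstrip(), ''] + lines[idx + 1:])
-- ===== Notes on version B (the rewrite author's own statement) =====
-- stated objective: simpler
-- what changed: Replaces the per-line append loop with its 'inserted' flag by a find-then-splice: locate the first matching H1 line index, return the original string if none, otherwise join the sliced prefix, the new section block and the suffix.
import Mathlib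
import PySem

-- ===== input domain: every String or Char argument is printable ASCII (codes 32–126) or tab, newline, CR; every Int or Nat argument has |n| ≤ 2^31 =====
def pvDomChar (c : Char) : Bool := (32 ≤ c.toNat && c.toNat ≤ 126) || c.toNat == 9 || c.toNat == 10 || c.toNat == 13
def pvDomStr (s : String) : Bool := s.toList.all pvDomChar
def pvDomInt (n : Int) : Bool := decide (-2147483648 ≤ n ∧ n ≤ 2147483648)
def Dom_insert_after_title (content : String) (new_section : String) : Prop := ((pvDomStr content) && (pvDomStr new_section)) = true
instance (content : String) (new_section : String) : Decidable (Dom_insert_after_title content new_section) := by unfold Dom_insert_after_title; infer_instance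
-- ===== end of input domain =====

-- B replaces A's per-line append loop with its 'inserted' flag by a find-then-splice decomposition (simpler); return values are equal everywhere.

-- ===== PORT A =====
-- the loop body: out.append(line); if not inserted and line.startswith('# ') and 'Agent v' in line: append '', new_section.rstrip(), ''
def iatA_step (ns : List Char) (acc : List (List Char) × Bool) (p : Int × List Char) :
    List (List Char) × Bool :=
  let out := acc.1 ++ [p.2]
  if (!acc.2) && PySem.Chars.startswith p.2 "# ".toList && PySem.Chars.isIn "Agent v".toList p.2 then
    (out ++ [[], PySem.Chars.rstrip ns, []], true)
  else
    (out, acc.2)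

def insert_after_title (content : String) (new_section : String) : String :=
  let lines := PySem.Chars.splitOn content.toList "\n".toList
  let st := (PySem.List.enumerate lines 0).foldl (iatA_step new_section.toList) ([], false)
  String.ofList (PySem.Chars.join "\n".toList st.1)

-- ===== PORT B =====
def iatB_match (l : List Char) : Bool :=
  PySem.Chars.startswith l "# ".toList && PySem.Chars.isIn "Agent v".toList l

def insert_after_title_alt (content : String) (new_section : String) : String :=
  let lines := PySem.Chars.splitOn content.toList "\n".toList
  match lines.findIdx? iatB_match with
  | none => content
  | some i =>
      String.ofList (PySem.Chars.join "\n".toList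
        (lines.take (i + 1) ++ [[], PySem.Chars.rstrip new_section.toList, []] ++ lines.drop (i + 1)))

-- ===== PRECONDITION & SPEC =====
def Spec_insert_after_title (content : String) (new_section : String) (out : String) : Prop := out = insert_after_title_alt content new_section
instance (content : String) (new_section : String) (out : String) : Decidable (Spec_insert_after_title content new_section out) := by unfold Spec_insert_after_title; infer_instance

-- ===== CLAIM (what is proved, stated in full; the proofs are below) =====
def Claim_equal_insert_after_title : Prop := ∀ (content : String) (new_section : String), Dom_insert_after_title content new_section → Spec_insert_after_title content new_section (insert_after_title content new_section)

-- ===== LEMMAS AND PROOFS =====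

-- once the flag is true, A's loop only appends the remaining lines
theorem iatA_loop_true (ns : List Char) (ls : List (List Char)) :
    ∀ (s : Int) (out : List (List Char)),
      (PySem.List.enumerate ls s).foldl (iatA_step ns) (out, true) = (out ++ ls, true) := by
  induction ls with
  | nil => intro s out; simp [PySem.List.enumerate]
  | cons x xs ih =>
      intro s out
      rw [PySem.List.enumerate_cons]
      simp only [List.foldl_cons, iatA_step]
      simpa using ih (s + 1) (out ++ [x])

-- no line matches: A's loop just copies the lines
theorem iatA_loop_none (ns : List Char) (ls : List (List Char))
    (h : ls.findIdx? iatB_match = none) :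
    ∀ (s : Int) (out : List (List Char)),
      (PySem.List.enumerate ls s).foldl (iatA_step ns) (out, false) = (out ++ ls, false) := by
  induction ls with
  | nil => intro s out; simp [PySem.List.enumerate]
  | cons x xs ih =>
      intro s out
      rw [List.findIdx?_cons] at h
      by_cases hx : iatB_match x
      · simp [hx] at h
      · simp only [hx, Option.map_eq_none_iff, Bool.false_eq_true, if_false] at h
        rw [PySem.List.enumerate_cons]
        simp only [List.foldl_cons, iatA_step, iatB_match] at *
        have hx' : (PySem.Chars.startswith x "# ".toList && PySem.Chars.isIn "Agent v".toList x) = false := by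
          simpa [iatB_match] using hx
        simp only [Bool.not_false, Bool.true_and, hx', Bool.false_eq_true, reduceIte]
        simpa using ih h (s + 1) (out ++ [x])

-- first match at index i: A's loop output is the spliced list
theorem iatA_loop_some (ns : List Char) (ls : List (List Char)) :
    ∀ (i : Nat), ls.findIdx? iatB_match = some i →
    ∀ (s : Int) (out : List (List Char)),
      ((PySem.List.enumerate ls s).foldl (iatA_step ns) (out, false)).1 =
        out ++ ls.take (i + 1) ++ [[], PySem.Chars.rstrip ns, []] ++ ls.drop (i + 1) := by
  induction ls with
  | nil => intro i h; simp at h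
  | cons x xs ih =>
      intro i h s out
      rw [List.findIdx?_cons] at h
      by_cases hx : iatB_match x
      · simp only [hx, if_true, Option.some.injEq] at h
        subst h
        rw [PySem.List.enumerate_cons]
        simp only [List.foldl_cons, iatA_step, iatB_match] at *
        have hx' : (PySem.Chars.startswith x "# ".toList && PySem.Chars.isIn "Agent v".toList x) = true := by
          simpa [iatB_match] using hx
        simp only [Bool.not_false, Bool.true_and, hx', if_true]
        rw [iatA_loop_true]
        simp
      · simp only [hx, Bool.false_eq_true, if_false] at h
        obtain ⟨j, hj, rfl⟩ := Option.map_eq_some_iff.mp h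
        rw [PySem.List.enumerate_cons]
        simp only [List.foldl_cons, iatA_step]
        have hx' : (PySem.Chars.startswith x "# ".toList && PySem.Chars.isIn "Agent v".toList x) = false := by
          simpa [iatB_match] using hx
        simp only [Bool.not_false, Bool.true_and, hx', Bool.false_eq_true, reduceIte]
        rw [ih j hj (s + 1) (out ++ [x])]
        simp [List.take_succ_cons, List.drop_succ_cons]

-- intercalate over a snoc
theorem intercalate_snoc {α : Type} (sep x : List α) (l : List (List α)) :
    sep.intercalate (l ++ [x]) =
      sep.intercalate l ++ (if l = [] then [] else sep) ++ x := by
  induction l with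
  | nil => simp [List.intercalate]
  | cons y ys ih =>
      cases ys with
      | nil => simp [List.intercalate]
      | cons z zs =>
          have step : ∀ (w : List (List α)), sep.intercalate (y :: z :: w) =
              y ++ sep ++ sep.intercalate (z :: w) := by
            intro w; simp [List.intercalate, List.intersperse]
          rw [List.cons_append, List.cons_append, step (zs ++ [x]), ← List.cons_append, ih, step zs]
          simp

-- '\n'.join(s.split('\n')) == s : the go-level invariant of splitOn
theorem splitOn_go_join (sep : List Char) (hsep : sep ≠ []) :
    ∀ (fuel : Nat) (l cur : List Char) (acc : List (List Char)), l.length ≤ fuel →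
      sep.intercalate (PySem.Chars.splitOn.go sep fuel l cur acc) =
        sep.intercalate acc.reverse ++ (if acc = [] then [] else sep) ++ cur.reverse ++ l := by
  intro fuel
  induction fuel with
  | zero =>
      intro l cur acc hl
      have : l = [] := List.eq_nil_of_length_eq_zero (Nat.le_zero.mp hl)
      subst this
      simp [PySem.Chars.splitOn.go, intercalate_snoc]
  | succ n ih =>
      intro l cur acc hl
      cases l with
      | nil => simp [PySem.Chars.splitOn.go, intercalate_snoc]
      | cons c rest =>
          rw [PySem.Chars.splitOn.go]
          by_cases hp : sep.isPrefixOf (c :: rest) = true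
          · rw [if_pos hp]
            have hpre : sep <+: (c :: rest) := List.isPrefixOf_iff_prefix.mp hp
            obtain ⟨t, ht⟩ := hpre
            have hdrop : (c :: rest).drop sep.length = t := by
              rw [← ht, List.drop_left]
            have hlen : t.length ≤ n := by
              have hlen1 : sep.length + t.length = rest.length + 1 := by
                have := congrArg List.length ht
                simpa [List.length_append] using this
              have hsl : 1 ≤ sep.length := by
                cases sep with
                | nil => exact absurd rfl hsep
                | cons a b => simp
              have hl' : rest.length + 1 ≤ n + 1 := by simpa using hl
              omega
            rw [hdrop, ih t [] (cur.reverse :: acc) hlen]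
            simp only [List.reverse_cons, List.reverse_nil]
            rw [intercalate_snoc]
            have : (cur.reverse :: acc) ≠ [] := by simp
            rw [if_neg this, ← ht]
            simp
          · rw [if_neg hp]
            have : rest.length ≤ n := by simpa using hl
            rw [ih rest (c :: cur) acc this]
            simp

theorem join_splitOn (s sep : List Char) (hsep : sep ≠ []) :
    PySem.Chars.join sep (PySem.Chars.splitOn s sep) = s := by
  unfold PySem.Chars.join PySem.Chars.splitOn
  rw [splitOn_go_join sep hsep (s.length + 1) s [] [] (by omega)]
  simp [List.intercalate]

-- ===== VERDICT (by name: the statement is the Claim_ definition above) =====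
theorem insert_after_title_spec : Claim_equal_insert_after_title := by
  intro content new_section _
  unfold Spec_insert_after_title insert_after_title insert_after_title_alt
  simp only []
  cases h : (PySem.Chars.splitOn content.toList "\n".toList).findIdx? iatB_match with
  | none =>
      rw [iatA_loop_none new_section.toList _ h 0 []]
      simp only [List.nil_append]
      rw [join_splitOn content.toList "\n".toList (by decide)]
      exact String.ofList_toList
  | some i =>
      rw [iatA_loop_some new_section.toList _ i h 0 []]
      simp
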